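-- pv_equiv track=rewrite | github.com/Kerisa/ExtractGames | BGI/tools/sekaichu-ch-merge.py | SpiltGroup
-- ===== SOURCE A (Python) =====
-- def SpiltGroup(file_list):
--     groups = {}
--     for f in file_list:
--         idx = f.find('base.')
--         if idx != -1:
--             groups[f] = []
--             for ff in file_list:
--                 if ff[:idx] == f[:idx] and ff != f:
--                     groups[f].append(ff)
--     return groups
-- ===== SOURCE B (Python) =====
-- def SpiltGroup(file_list):
--     # Build a prefix-indexed table once (deduplicating identical prefixes),
--     # then assemble each group by one lookup instead of a rescan per base file.
--     prefix_map = {}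
--     for f in file_list:
--         idx = f.find('base.')
--         if idx != -1:
--             p = f[:idx]
--             if p not in prefix_map:
--                 prefix_map[p] = [ff for ff in file_list if ff.startswith(p)]
--     groups = {}
--     for f in file_list:
--         idx = f.find('base.')
--         if idx != -1:
--             groups[f] = [ff for ff in prefix_map[f[:idx]] if ff != f]
--     return groups
-- ===== Notes on version B (the rewrite author's own statement) =====
-- stated objective: alternative
-- what changed: B replaces A's per-base-file rescan of the whole list with a two-pass scheme: a first pass builds a dict keyed by prefix holding each prefix's matching files once (deduplicating identical prefixes), and a second pass assembles each group by a single dict lookup plus a filter of that prebuilt list.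
import Mathlib
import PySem

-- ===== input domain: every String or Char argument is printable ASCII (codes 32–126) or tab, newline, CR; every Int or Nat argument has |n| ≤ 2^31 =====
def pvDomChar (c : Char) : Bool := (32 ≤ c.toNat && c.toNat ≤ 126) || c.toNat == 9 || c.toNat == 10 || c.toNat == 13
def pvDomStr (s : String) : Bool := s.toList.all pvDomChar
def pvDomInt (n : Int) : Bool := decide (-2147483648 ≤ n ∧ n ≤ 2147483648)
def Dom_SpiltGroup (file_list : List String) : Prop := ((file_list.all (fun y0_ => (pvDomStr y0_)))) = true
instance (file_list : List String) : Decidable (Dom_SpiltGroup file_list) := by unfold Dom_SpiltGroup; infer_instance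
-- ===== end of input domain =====

-- B builds a prefix-indexed table once (deduplicating identical prefixes) and assembles each
-- group by one lookup, instead of A's rescan of the whole list for every base file (alternative decomposition).


-- ===== PORT A =====
def SpiltGroup (file_list : List String) : List (String × List String) :=
  (file_list.foldl (fun groups f =>
    let idx := PySem.Str.find f "base."
    if idx ≠ -1 then
      let groups := groups.insert f []
      file_list.foldl (fun g ff =>
        if (PySem.Str.slice ff none (some idx) == PySem.Str.slice f none (some idx)) && ff != f then
          g.insert f (g.getD f [] ++ [ff])
        else g) groups
    else groups) PySem.Dict.empty).items

-- ===== PORT B =====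
def SpiltGroup_alt (file_list : List String) : List (String × List String) :=
  let prefix_map : PySem.Dict String (List String) := file_list.foldl (fun pm f =>
    let idx := PySem.Str.find f "base."
    if idx ≠ -1 then
      let p := PySem.Str.slice f none (some idx)
      if pm.contains p then pm
      else pm.insert p (file_list.filter (fun ff => PySem.Str.startswith ff p))
    else pm) PySem.Dict.empty
  (file_list.foldl (fun g f =>
    let idx := PySem.Str.find f "base."
    if idx ≠ -1 then
      g.insert f ((prefix_map.getD (PySem.Str.slice f none (some idx)) []).filter (fun ff => ff != f))
    else g) PySem.Dict.empty).items

-- ===== PRECONDITION & SPEC =====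
def Spec_SpiltGroup (file_list : List String) (out : List (String × List String)) : Prop := out = SpiltGroup_alt file_list
instance (file_list : List String) (out : List (String × List String)) : Decidable (Spec_SpiltGroup file_list out) := by unfold Spec_SpiltGroup; infer_instance

-- ===== CLAIM (what is proved, stated in full; the proofs are below) =====
def Claim_equal_SpiltGroup : Prop := ∀ (file_list : List String), Dom_SpiltGroup file_list → Spec_SpiltGroup file_list (SpiltGroup file_list)

-- ===== LEMMAS AND PROOFS =====

-- the prefix of a base file: f[:f.find('base.')]
def pvPfx (f : String) : String := PySem.Str.slice f none (some (PySem.Str.find f "base."))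

-- the canonical list stored for a prefix p
def pvF (fl : List String) (p : String) : List String := fl.filter (fun ff => PySem.Str.startswith ff p)

-- B's first-pass step, named
def pvStep1 (fl : List String) (pm : PySem.Dict String (List String)) (f : String) : PySem.Dict String (List String) :=
  if PySem.Str.find f "base." ≠ -1 then
    (if pm.contains (pvPfx f) then pm
     else pm.insert (pvPfx f) (pvF fl (pvPfx f)))
  else pm

lemma alt_eq (fl : List String) :
    SpiltGroup_alt fl =
      (fl.foldl (fun g f =>
        if PySem.Str.find f "base." ≠ -1 then
          g.insert f (((fl.foldl (pvStep1 fl) PySem.Dict.empty).getD (pvPfx f) []).filter (fun ff => ff != f))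
        else g) PySem.Dict.empty).items := rfl

-- A's inner append loop, as one insert
lemma inner_loop_eq (l : List String) (c : String → Bool) (f : String) :
    ∀ (d : PySem.Dict String (List String)) (v : List String),
      l.foldl (fun g ff => if c ff then g.insert f (g.getD f [] ++ [ff]) else g) (d.insert f v)
      = d.insert f (v ++ l.filter c) := by
  induction l with
  | nil => intro d v; simp
  | cons x t ih =>
    intro d v
    by_cases hx : c x = true
    · rw [List.foldl_cons, if_pos hx, PySem.Dict.getD_insert_self, PySem.Dict.insert_insert_self, ih]
      simp [hx]
    · rw [List.foldl_cons, if_neg hx, ih]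
      simp [hx]

-- on a base file f, the slice test of A is the startswith test of B
lemma slice_eq_startswith (f : String) (h : PySem.Str.find f "base." ≠ -1) (ff : String) :
    (PySem.Str.slice ff none (some (PySem.Str.find f "base.")) == PySem.Str.slice f none (some (PySem.Str.find f "base.")))
      = PySem.Str.startswith ff (PySem.Str.slice f none (some (PySem.Str.find f "base."))) := by
  rw [PySem.Str.find_eq] at h ⊢
  have h1 := PySem.Chars.neg_one_le_find f.toList "base.".toList
  have h0 : 0 ≤ PySem.Chars.find f.toList "base.".toList := by omega
  have hle := PySem.Chars.find_le_length f.toList "base.".toList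
  set i := PySem.Chars.find f.toList "base.".toList with hi
  have hsl : ∀ (s : String), (PySem.Str.slice s none (some i)).toList = s.toList.take i.toNat := by
    intro s
    rw [PySem.Str.toList_slice, PySem.Chars.slice_eq_listSlice, PySem.List.slice_to _ h0]
  have hlen : (f.toList.take i.toNat).length = i.toNat := by
    rw [List.length_take]; omega
  rw [Bool.eq_iff_iff]
  simp only [beq_iff_eq, PySem.Str.startswith_eq, ← String.toList_inj, hsl,
    PySem.Chars.startswith_iff, List.prefix_iff_eq_take, hlen]
  constructor <;> (intro hh; exact hh.symm)

-- first-pass invariant: every stored value is canonical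
lemma pm_values (fl : List String) :
    ∀ (l : List String) (pm : PySem.Dict String (List String)),
      (∀ q v, pm.get? q = some v → v = pvF fl q) →
      ∀ q v, (l.foldl (pvStep1 fl) pm).get? q = some v → v = pvF fl q := by
  intro l
  induction l with
  | nil => intro pm hpm; simpa using hpm
  | cons x t ih =>
    intro pm hpm
    refine ih _ ?_
    intro q v hq
    simp only [pvStep1] at hq
    split at hq
    · split at hq
      · exact hpm q v hq
      · rw [PySem.Dict.get?_insert] at hq
        split at hq
        · next hqp =>
            rw [hqp]
            injection hq with hv
            exact hv.symm
        · exact hpm q v hq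
    · exact hpm q v hq

-- contains is monotone through the first pass
lemma pm_contains_mono (fl : List String) :
    ∀ (l : List String) (pm : PySem.Dict String (List String)) (q : String),
      pm.contains q = true → (l.foldl (pvStep1 fl) pm).contains q = true := by
  intro l
  induction l with
  | nil => intro pm q h; simpa using h
  | cons x t ih =>
    intro pm q h
    refine ih _ _ ?_
    simp only [pvStep1]
    split
    · split
      · exact h
      · rw [PySem.Dict.contains_insert]; simp [h]
    · exact h

-- after the first pass, the prefix of every base file of the processed part is present
lemma pm_contains (fl : List String) :
    ∀ (l : List String) (pm : PySem.Dict String (List String)) (f : String),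
      f ∈ l → PySem.Str.find f "base." ≠ -1 →
      (l.foldl (pvStep1 fl) pm).contains (pvPfx f) = true := by
  intro l
  induction l with
  | nil => intro pm f h; cases h
  | cons x t ih =>
    intro pm f hmem hf
    rcases List.mem_cons.mp hmem with hfx | hft
    · subst hfx
      refine pm_contains_mono fl t _ _ ?_
      simp only [pvStep1, if_pos hf]
      split
      · assumption
      · exact PySem.Dict.contains_insert_self _ _ _
    · exact ih _ f hft hf

lemma pm_getD (fl : List String) (f : String) (hmem : f ∈ fl) (hf : PySem.Str.find f "base." ≠ -1) :
    (fl.foldl (pvStep1 fl) PySem.Dict.empty).getD (pvPfx f) [] = pvF fl (pvPfx f) := by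
  have hc := pm_contains fl fl PySem.Dict.empty f hmem hf
  rw [PySem.Dict.contains_eq_isSome_get?] at hc
  rcases Option.isSome_iff_exists.mp hc with ⟨v, hv⟩
  have := pm_values fl fl PySem.Dict.empty (by intro q v h; simp [PySem.Dict.get?_empty] at h) _ _ hv
  rw [PySem.Dict.getD_eq_get?_getD, hv, Option.getD_some, this]

-- ===== VERDICT (by name: the statement is the Claim_ definition above) =====
theorem SpiltGroup_spec : Claim_equal_SpiltGroup := by
  intro fl _
  show SpiltGroup fl = SpiltGroup_alt fl
  rw [alt_eq]
  unfold SpiltGroup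
  refine congrArg PySem.Dict.items ?_
  apply PySem.List.foldl_congr_mem
  intro g f hmem
  dsimp only
  by_cases hf : PySem.Str.find f "base." ≠ -1
  · rw [if_pos hf, if_pos hf, inner_loop_eq, List.nil_append, pm_getD fl f hmem hf]
    simp only [pvF, pvPfx, List.filter_filter]
    refine congrArg _ (List.filter_congr ?_)
    intro ff _
    rw [slice_eq_startswith f hf ff]
    exact Bool.and_comm _ _
  · rw [if_neg hf, if_neg hf]
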